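-- pv_equiv track=rewrite | github.com/Tugcga/S-USD | prim_pointcloud.py | split_positions_to_strands_and_points
-- ===== SOURCE A (Python) =====
-- def split_positions_to_strands_and_points(raw_positions, segment_length):
--     strands = []
--     points = []
--     current_strand = 0
--     in_strand_index = 0
--     one_strand = []
--     for pos in raw_positions:
--         if in_strand_index == 0:
--             points.append([pos[0], pos[1], pos[2]])
--         else:
--             one_strand.append([pos[0], pos[1], pos[2]])
--         in_strand_index += 1
--         if in_strand_index == segment_length[current_strand]:
--             strands.append(one_strand)
--             one_strand = []
--             in_strand_index = 0
--             current_strand += 1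
--
--     return strands, points
-- ===== SOURCE B (Python) =====
-- def split_positions_to_strands_and_points(raw_positions, segment_length):
--     # Slice-based: one loop over strands (not per-position state machine).
--     # Return-value equivalent to A on inputs with positive segment lengths.
--     raw_positions = list(raw_positions)
--     n = len(raw_positions)
--     strands = []
--     points = []
--     idx = 0
--     current = 0
--     while idx < n:
--         L = segment_length[current]
--         if L <= 0:
--             raise ValueError("segment length must be positive")
--         p = raw_positions[idx]
--         points.append([p[0], p[1], p[2]])
--         if idx + L > n:
--             break  # partial final strand: its starting point is kept, the strand dropped
--         strands.append([[q[0], q[1], q[2]] for q in raw_positions[idx + 1:idx + L]])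
--         idx += L
--         current += 1
--     return strands, points
-- ===== Notes on version B (the rewrite author's own statement) =====
-- stated objective: alternative
-- what changed: B replaces A's per-position state machine (in_strand_index/one_strand accumulators) with one loop per strand that slices raw_positions[idx+1:idx+L] directly, building each strand in a single slice-copy.
-- outside the precondition, e.g. on split_positions_to_strands_and_points([[1, 2, 3], [4, 5, 6]], [0]): A returns ([], [[1, 2, 3]]), B raises ValueError; on split_positions_to_strands_and_points([[1, 2, 3]], [-2]): A returns ([], [[1, 2, 3]]), B raises ValueError
import Mathlib
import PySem

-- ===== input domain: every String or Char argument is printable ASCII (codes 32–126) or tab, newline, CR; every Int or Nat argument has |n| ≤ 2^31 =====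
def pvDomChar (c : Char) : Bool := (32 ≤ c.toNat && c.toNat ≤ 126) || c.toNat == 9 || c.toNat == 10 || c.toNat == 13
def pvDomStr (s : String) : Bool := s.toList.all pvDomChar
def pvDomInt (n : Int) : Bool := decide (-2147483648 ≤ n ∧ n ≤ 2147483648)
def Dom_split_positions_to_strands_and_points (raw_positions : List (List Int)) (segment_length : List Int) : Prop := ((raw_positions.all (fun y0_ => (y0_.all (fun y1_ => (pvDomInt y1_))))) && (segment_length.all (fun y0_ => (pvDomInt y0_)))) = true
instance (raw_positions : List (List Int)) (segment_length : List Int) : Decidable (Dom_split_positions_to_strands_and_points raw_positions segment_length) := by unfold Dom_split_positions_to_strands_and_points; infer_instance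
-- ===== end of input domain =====

-- B replaces A's per-position state machine with one loop per strand that slices the
-- strand out of raw_positions directly; same cost, different decomposition.

-- ===== PORT A =====
-- [pos[0], pos[1], pos[2]]; pyGet? returns none on IndexError, Pre_ guarantees length ≥ 3
def pvCoords (pos : List Int) : List Int :=
  [(PySem.List.pyGet? pos 0).getD 0, (PySem.List.pyGet? pos 1).getD 0, (PySem.List.pyGet? pos 2).getD 0]

-- one iteration of A's for-loop; state = (strands, points, current_strand, in_strand_index, one_strand)
def spStepA (seg : List Int)
    (st : List (List (List Int)) × List (List Int) × Int × Int × List (List Int))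
    (pos : List Int) :
    List (List (List Int)) × List (List Int) × Int × Int × List (List Int) :=
  let points := if st.2.2.2.1 = 0 then st.2.1 ++ [pvCoords pos] else st.2.1
  let one := if st.2.2.2.1 = 0 then st.2.2.2.2 else st.2.2.2.2 ++ [pvCoords pos]
  let inIdx := st.2.2.2.1 + 1
  -- segment_length[current_strand]; Pre_ guarantees the index is in range
  if inIdx = (PySem.List.pyGet? seg st.2.2.1).getD 0 then
    (st.1 ++ [one], points, st.2.2.1 + 1, 0, [])
  else
    (st.1, points, st.2.2.1, inIdx, one)

def split_positions_to_strands_and_points (raw_positions : List (List Int)) (segment_length : List Int) : List (List (List Int)) × List (List Int) :=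
  let st := raw_positions.foldl (spStepA segment_length) ([], [], 0, 0, [])
  (st.1, st.2.1)

-- ===== PORT B =====
-- B's while loop: 'rest' is raw_positions[idx:]; a strand is the slice rest[1:L] (take/drop).
-- Where B raises ValueError (L ≤ 0, excluded by Pre_) the port returns ([], []).
def spGoB (seg : List Int) (rest : List (List Int)) (current : Int) :
    List (List (List Int)) × List (List Int) :=
  match rest with
  | [] => ([], [])
  | p :: tl =>
    let L := (PySem.List.pyGet? seg current).getD 0
    if L ≤ 0 then ([], [])  -- Python B raises ValueError here
    else if L.toNat - 1 ≤ tl.length then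
      let strand := (tl.take (L.toNat - 1)).map pvCoords
      let res := spGoB seg (tl.drop (L.toNat - 1)) (current + 1)
      (strand :: res.1, pvCoords p :: res.2)
    else ([], [pvCoords p])  -- partial final strand: keep the point, drop the strand
termination_by rest.length
decreasing_by simp

def split_positions_to_strands_and_points_alt (raw_positions : List (List Int)) (segment_length : List Int) : List (List (List Int)) × List (List Int) :=
  spGoB segment_length raw_positions 0

-- ===== PRECONDITION & SPEC =====
-- Pre_ excludes exactly: positions with fewer than 3 coordinates (A raises IndexError),
-- runs of positions outlasting segment_length (A raises IndexError on segment_length[current_strand]),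
-- and a reached non-positive segment length -- there A still returns (it silently swallows all
-- remaining positions into a strand it never emits, an artefact of its state machine) while B's
-- while loop cannot advance, so B raises ValueError.  Entries of segment_length beyond the
-- positions actually consumed are unconstrained.
def Pre_split_positions_to_strands_and_points (raw_positions : List (List Int)) (segment_length : List Int) : Prop :=
  (∀ p ∈ raw_positions, 3 ≤ p.length) ∧
    ∀ k : Nat, k < segment_length.length + 1 →
      (∀ i : Nat, i < k → 1 ≤ segment_length.getD i 0) →
      (segment_length.take k).sum < (raw_positions.length : Int) →
        k < segment_length.length ∧ 1 ≤ segment_length.getD k 0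

instance (raw_positions : List (List Int)) (segment_length : List Int) : Decidable (Pre_split_positions_to_strands_and_points raw_positions segment_length) := by unfold Pre_split_positions_to_strands_and_points; infer_instance

def pvWitness_split_positions_to_strands_and_points : List (List Int) × List Int :=
  ([[1, 2, 3], [4, 5, 6], [7, 8, 9]], [2, 1])

def Spec_split_positions_to_strands_and_points (raw_positions : List (List Int)) (segment_length : List Int) (out : List (List (List Int)) × List (List Int)) : Prop := out = split_positions_to_strands_and_points_alt raw_positions segment_length
instance (raw_positions : List (List Int)) (segment_length : List Int) (out : List (List (List Int)) × List (List Int)) : Decidable (Spec_split_positions_to_strands_and_points raw_positions segment_length out) := by unfold Spec_split_positions_to_strands_and_points; infer_instance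

-- ===== CLAIM (what is proved, stated in full; the proofs are below) =====
def Claim_equal_split_positions_to_strands_and_points : Prop := ∀ (raw_positions : List (List Int)) (segment_length : List Int), Dom_split_positions_to_strands_and_points raw_positions segment_length → Pre_split_positions_to_strands_and_points raw_positions segment_length → Spec_split_positions_to_strands_and_points raw_positions segment_length (split_positions_to_strands_and_points raw_positions segment_length)

-- ===== LEMMAS AND PROOFS =====

-- A's fold across the interior of one strand, not yet completing it
lemma spA_inner_partial (seg : List Int) (c : List (List Int)) :
    ∀ (S : List (List (List Int))) (P : List (List Int)) (k j : Int) (one : List (List Int)),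
      1 ≤ j → j + c.length < (PySem.List.pyGet? seg k).getD 0 →
      c.foldl (spStepA seg) (S, P, k, j, one)
        = (S, P, k, j + c.length, one ++ c.map pvCoords) := by
  induction c with
  | nil => intro S P k j one h1 h2; simp
  | cons q c ih =>
    intro S P k j one h1 h2
    simp only [List.length_cons] at h2; push_cast at h2
    have h0 : ¬ (j = (0 : Int)) := by omega
    have hne : ¬ (j + 1 = (PySem.List.pyGet? seg k).getD 0) := by omega
    simp only [List.foldl_cons, spStepA, if_neg h0, if_neg hne]
    rw [ih S P k (j + 1) (one ++ [pvCoords q]) (by omega) (by omega)]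
    simp; omega

-- A's fold across the interior of one strand, completing it at the last position
lemma spA_inner_complete (seg : List Int) (c : List (List Int)) :
    ∀ (S : List (List (List Int))) (P : List (List Int)) (k j : Int) (one : List (List Int)),
      c ≠ [] → 1 ≤ j → j + c.length = (PySem.List.pyGet? seg k).getD 0 →
      c.foldl (spStepA seg) (S, P, k, j, one)
        = (S ++ [one ++ c.map pvCoords], P, k + 1, 0, []) := by
  induction c with
  | nil => intro _ _ _ _ _ hne; exact absurd rfl hne
  | cons q c ih =>
    intro S P k j one _ h1 h2
    simp only [List.length_cons] at h2; push_cast at h2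
    have h0 : ¬ (j = (0 : Int)) := by omega
    by_cases hc : c = []
    · subst hc
      simp only [List.length_nil, Nat.cast_zero, zero_add] at h2
      have hfl : j + 1 = (PySem.List.pyGet? seg k).getD 0 := by omega
      simp only [List.foldl_cons, List.foldl_nil, spStepA, if_neg h0, if_pos hfl]
      simp
    · have hclen : 1 ≤ (c.length : Int) := by
        have := List.length_pos_of_ne_nil hc; omega
      have hne : ¬ (j + 1 = (PySem.List.pyGet? seg k).getD 0) := by omega
      simp only [List.foldl_cons, spStepA, if_neg h0, if_neg hne]
      rw [ih S P k (j + 1) (one ++ [pvCoords q]) hc (by omega) (by omega)]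
      simp

-- main invariant: from a strand boundary, A's fold and B's strand loop agree.
-- The hypothesis is Pre_'s prefix-sum condition relativized to the remaining segments.
lemma spA_outer (seg : List Int) :
    ∀ (n : Nat) (rest : List (List Int)), rest.length ≤ n →
    ∀ (k : Nat) (S : List (List (List Int))) (P : List (List Int)),
      (∀ j : Nat, (∀ i : Nat, i < j → 1 ≤ (seg.drop k).getD i 0) →
          (((seg.drop k).take j).sum < (rest.length : Int)) →
          k + j < seg.length ∧ 1 ≤ seg.getD (k + j) 0) →
      (rest.foldl (spStepA seg) (S, P, (k : Int), 0, [])).1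
          = S ++ (spGoB seg rest (k : Int)).1
        ∧ (rest.foldl (spStepA seg) (S, P, (k : Int), 0, [])).2.1
          = P ++ (spGoB seg rest (k : Int)).2 := by
  intro n
  induction n with
  | zero =>
    intro rest hlen k S P _
    have : rest = [] := List.length_eq_zero_iff.mp (Nat.le_zero.mp hlen)
    subst this; simp [spGoB]
  | succ n ih =>
    intro rest hlen k S P hH
    cases rest with
    | nil => simp [spGoB]
    | cons p tl =>
      have h0 := hH 0 (fun i hi => absurd hi (Nat.not_lt_zero i)) (by simp)
      have hkin : k < seg.length := by simpa using h0.1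
      have hget : PySem.List.pyGet? seg (k : Int) = some seg[k] :=
        PySem.List.pyGet?_ofNat seg k hkin
      set L : Int := seg[k] with hLdef
      have hL1 : 1 ≤ L := by
        have := h0.2
        rwa [Nat.add_zero, List.getD_eq_getElem _ _ hkin] at this
      have hdrop : seg.drop k = seg[k] :: seg.drop (k + 1) :=
        List.drop_eq_getElem_cons hkin
      have hcast : ((k : Int) + 1) = ((k + 1 : Nat) : Int) := by push_cast; ring
      -- the relativized hypothesis for the next strand boundary, given how many
      -- positions the current strand consumed
      have hHnext : ∀ (r' : List (List Int)), (r'.length : Int) + L = (p :: tl).length →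
          (∀ j : Nat, (∀ i : Nat, i < j → 1 ≤ (seg.drop (k + 1)).getD i 0) →
            (((seg.drop (k + 1)).take j).sum < (r'.length : Int)) →
            (k + 1) + j < seg.length ∧ 1 ≤ seg.getD ((k + 1) + j) 0) := by
        intro r' hr' j hP hj
        have hP' : ∀ i : Nat, i < j + 1 → 1 ≤ (seg.drop k).getD i 0 := by
          intro i hi
          cases i with
          | zero => rw [hdrop, List.getD_cons_zero]; exact hL1
          | succ m => rw [hdrop, List.getD_cons_succ]; exact hP m (by omega)
        have hsum : ((seg.drop k).take (j + 1)).sum < ((p :: tl).length : Int) := by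
          rw [hdrop, List.take_succ_cons, List.sum_cons, ← hLdef]
          omega
        have := hH (j + 1) hP' hsum
        have harr : k + (j + 1) = (k + 1) + j := by omega
        rw [harr] at this
        exact this
      have hstep0 : spStepA seg (S, P, (k : Int), 0, []) p
          = if (0 : Int) + 1 = L then (S ++ [([] : List (List Int))], P ++ [pvCoords p], (k : Int) + 1, 0, [])
            else (S, P ++ [pvCoords p], (k : Int), 0 + 1, []) := by
        simp [spStepA, hget]
      by_cases hL : L = 1
      · -- strand of length 1: the point alone completes it
        have hBeq : spGoB seg (p :: tl) (k : Int)
            = ([] :: (spGoB seg tl ((k : Int) + 1)).1, pvCoords p :: (spGoB seg tl ((k : Int) + 1)).2) := by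
          rw [spGoB]
          simp only [hget, Option.getD_some, hL]
          norm_num
        have hIH := ih tl (by simp at hlen; omega) (k + 1) (S ++ [([] : List (List Int))]) (P ++ [pvCoords p])
          (hHnext tl (by simp [hL]))
        rw [List.foldl_cons, hstep0, if_pos (by omega), hcast, hBeq]
        exact ⟨by rw [hIH.1]; simp [← hcast], by rw [hIH.2]; simp [← hcast]⟩
      · have hL2 : 2 ≤ L := by omega
        rw [List.foldl_cons, hstep0, if_neg (by omega)]
        simp only [zero_add]
        by_cases hcomp : L.toNat - 1 ≤ tl.length
        · -- the strand completes inside tl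
          set c : List (List Int) := tl.take (L.toNat - 1) with hc
          set r : List (List Int) := tl.drop (L.toNat - 1) with hr
          have hclen : c.length = L.toNat - 1 := by
            rw [hc]; simp; omega
          have hcne : c ≠ [] := by
            intro h; rw [h] at hclen; simp at hclen; omega
          have hBeq : spGoB seg (p :: tl) (k : Int)
              = ((c.map pvCoords) :: (spGoB seg r ((k : Int) + 1)).1,
                 pvCoords p :: (spGoB seg r ((k : Int) + 1)).2) := by
            rw [spGoB]
            simp only [hget, Option.getD_some, ← hc, ← hr]
            rw [if_neg (by omega), if_pos hcomp]
          have htl : tl = c ++ r := (List.take_append_drop _ tl).symm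
          have hinner := spA_inner_complete seg c S (P ++ [pvCoords p]) (k : Int) 1 []
            hcne le_rfl (by rw [hclen, hget]; simp; omega)
          have hrlen : r.length = tl.length - (L.toNat - 1) := by rw [hr]; simp
          have hIH := ih r (by simp at hlen; omega) (k + 1)
            (S ++ [[] ++ c.map pvCoords]) (P ++ [pvCoords p])
            (hHnext r (by simp only [hrlen, List.length_cons]; omega))
          rw [hBeq, htl, List.foldl_append, hinner, hcast]
          exact ⟨by rw [hIH.1]; simp [← hcast], by rw [hIH.2]; simp [← hcast]⟩
        · -- partial final strand: point kept, strand dropped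
          have hBeq : spGoB seg (p :: tl) (k : Int) = ([], [pvCoords p]) := by
            rw [spGoB]
            simp only [hget, Option.getD_some]
            rw [if_neg (by omega), if_neg hcomp]
          have hinner := spA_inner_partial seg tl S (P ++ [pvCoords p]) (k : Int) 1 []
            le_rfl (by rw [hget]; simp; omega)
          rw [hinner, hBeq]
          simp

-- ===== VERDICT (by name: the statement is the Claim_ definition above) =====
theorem split_positions_to_strands_and_points_spec : Claim_equal_split_positions_to_strands_and_points := by
  intro raw seg _ hpre
  obtain ⟨_, hpre⟩ := hpre
  unfold Spec_split_positions_to_strands_and_points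
  unfold split_positions_to_strands_and_points split_positions_to_strands_and_points_alt
  have hH : ∀ j : Nat, (∀ i : Nat, i < j → 1 ≤ (seg.drop 0).getD i 0) →
      (((seg.drop 0).take j).sum < (raw.length : Int)) →
      0 + j < seg.length ∧ 1 ≤ seg.getD (0 + j) 0 := by
    intro j hP hj
    simp only [List.drop_zero] at hP hj
    simp only [Nat.zero_add]
    by_cases hjl : j ≤ seg.length
    · exact hpre j (by omega) hP hj
    · exfalso
      rw [List.take_of_length_le (by omega)] at hj
      have := hpre seg.length (by omega) (fun i hi => hP i (by omega))
        (by rw [List.take_length]; exact hj)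
      omega
  have h := spA_outer seg raw.length raw le_rfl 0 [] [] hH
  simp only [Nat.cast_zero] at h
  show ((raw.foldl (spStepA seg) ([], [], 0, 0, [])).1,
        (raw.foldl (spStepA seg) ([], [], 0, 0, [])).2.1)
      = spGoB seg raw 0
  exact Prod.ext (by rw [h.1]; simp) (by rw [h.2]; simp)
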